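-- pv_equiv track=rewrite | github.com/daanjo3/artc | src/data/loader/classes.py | iconclass_divider
-- ===== SOURCE A (Python) =====
-- def iconclass_divider(iconclass):
--     iconclasses = []
--     current = ""
--
--     if iconclass == None or iconclass == "":
--         return []
--     if not iconclass[0].isdigit:
--         return []
--
--     for ic in iconclass:
--         if ic == ':' or ic == '(':
--             return iconclasses
--         current += ic
--         iconclasses.append(current)
--     return iconclasses
-- ===== SOURCE B (Python) =====
-- def iconclass_divider(iconclass):
--     # Phase 1: guard (None/empty -> []); the original's "isdigit" check is a
--     # no-op (method reference, always truthy), so it imposes nothing.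
--     if iconclass is None or iconclass == "":
--         return []
--     # Phase 2: find the cut position = index of first ':' or '('.
--     n = next((i for i, c in enumerate(iconclass) if c in ':('), len(iconclass))
--     # Phase 3: generate all prefixes up to the cut by slicing.
--     return [iconclass[:i] for i in range(1, n + 1)]
-- ===== Notes on version B (the rewrite author's own statement) =====
-- stated objective: simpler
-- what changed: Replaces the accumulator-building single pass (growing 'current' and appending each step, with an early return inside the loop) by a find-boundary-then-slice decomposition: compute the index n of the first ':' or '(' and return the prefixes [iconclass[:i] for i in range(1, n+1)].
import Mathlib
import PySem

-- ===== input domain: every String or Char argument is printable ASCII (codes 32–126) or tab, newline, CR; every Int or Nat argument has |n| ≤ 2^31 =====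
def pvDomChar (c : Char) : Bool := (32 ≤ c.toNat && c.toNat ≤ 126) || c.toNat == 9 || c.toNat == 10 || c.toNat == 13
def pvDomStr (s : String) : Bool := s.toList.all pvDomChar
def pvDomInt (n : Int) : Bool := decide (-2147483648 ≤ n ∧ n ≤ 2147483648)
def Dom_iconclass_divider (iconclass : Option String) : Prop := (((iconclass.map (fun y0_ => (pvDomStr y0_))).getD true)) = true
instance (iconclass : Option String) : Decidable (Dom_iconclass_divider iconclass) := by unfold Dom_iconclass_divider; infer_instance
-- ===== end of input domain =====

-- B replaces A's accumulator-building loop by a find-the-cut-then-slice decomposition (simpler; same cost).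



-- ===== PORT A =====
-- loop over the characters, growing `current` and appending each prefix; early return on ':' or '('
def pvLoopA : List Char → List String → String → List String
  | [], iconclasses, _ => iconclasses
  | ic :: rest, iconclasses, current =>
    if ic = ':' ∨ ic = '(' then iconclasses
    else pvLoopA rest (iconclasses ++ [current.push ic]) (current.push ic)

def iconclass_divider (iconclass : Option String) : List String :=
  match iconclass with
  | none => []
  | some s =>
    if s = "" then []
    -- `if not iconclass[0].isdigit: return []`: `isdigit` is a method reference
    -- (always truthy), so the branch is never taken; ported as a no-op.
    else pvLoopA s.toList [] ""

-- ===== PORT B =====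
def iconclass_divider_alt (iconclass : Option String) : List String :=
  match iconclass with
  | none => []
  | some s =>
    if s = "" then []
    else
      let cs := s.toList
      let n := (cs.findIdx? (fun c => c = ':' || c = '(')).getD cs.length
      (List.range n).map (fun i => String.mk (cs.take (i + 1)))

-- ===== PRECONDITION & SPEC =====
def Spec_iconclass_divider (iconclass : Option String) (out : List String) : Prop := out = iconclass_divider_alt iconclass
instance (iconclass : Option String) (out : List String) : Decidable (Spec_iconclass_divider iconclass out) := by unfold Spec_iconclass_divider; infer_instance

-- ===== CLAIM (what is proved, stated in full; the proofs are below) =====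
def Claim_equal_iconclass_divider : Prop := ∀ (iconclass : Option String), Dom_iconclass_divider iconclass → Spec_iconclass_divider iconclass (iconclass_divider iconclass)

-- ===== LEMMAS AND PROOFS =====

theorem pvLoopA_eq (cs : List Char) : ∀ (acc : List String) (p : List Char),
    pvLoopA cs acc (String.mk p) =
      acc ++ (List.range ((cs.findIdx? (fun c => c = ':' || c = '(')).getD cs.length)).map
        (fun i => String.mk (p ++ cs.take (i + 1))) := by
  induction cs with
  | nil => intro acc p; simp [pvLoopA]
  | cons c rest ih =>
    intro acc p
    by_cases h : c = ':' ∨ c = '('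
    · have hb : (c = ':' || c = '(') = true := by
        rcases h with h | h <;> simp [h]
      simp [pvLoopA, h, List.findIdx?_cons, hb]
    · have hb : (c = ':' || c = '(') = false := by
        push_neg at h; simp [h.1, h.2]
      have hpush : (String.mk p).push c = String.mk (p ++ [c]) := by simp [String.push, String.mk]
      rw [pvLoopA, if_neg h, hpush, ih]
      have hn : ((c :: rest).findIdx? (fun c => c = ':' || c = '(')).getD (c :: rest).length
          = ((rest.findIdx? (fun c => c = ':' || c = '(')).getD rest.length) + 1 := by
        rw [List.findIdx?_cons, hb]
        cases rest.findIdx? (fun c => c = ':' || c = '(') <;> simp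
      rw [hn, List.range_succ_eq_map]
      simp [List.map_cons, List.map_map, List.append_assoc, Function.comp]

-- ===== VERDICT (by name: the statement is the Claim_ definition above) =====
theorem iconclass_divider_spec : Claim_equal_iconclass_divider := by
  intro iconclass _
  unfold Spec_iconclass_divider iconclass_divider iconclass_divider_alt
  cases iconclass with
  | none => rfl
  | some s =>
    by_cases hs : s = ""
    · simp [hs]
    · have h0 : ("" : String) = String.mk [] := by decide
      simp only [if_neg hs]
      rw [h0, pvLoopA_eq]
      simp
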